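-- pv_equiv track=rewrite | github.com/majed354/KPI_TaifShare3h | extract_data.py | get_year_n_before
-- ===== SOURCE A (Python) =====
-- YEAR_SEQUENCE = [38, 39, 40, 41, 42, 44, 45, 46, 47]
--
-- def get_year_n_before(year, n):
--     """الحصول على السنة قبل n سنوات حقيقية (بالحساب الفعلي وليس بالفهرس)
--     مثال: سنة 1446 قبل 4 سنوات = 1442 (وليس 1441)
--     لأن 1443 غير موجودة (مدمجة) لكن الفارق الزمني الحقيقي هو 4 سنوات
--     إذا وقعت السنة المستهدفة على سنة غير موجودة (مثل 1443)
--     نرجع لأقرب سنة متاحة قبلها (1442)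
--     """
--     target = year - n
--     if target in YEAR_SEQUENCE:
--         return target
--     # سنة 1443 مدمجة → نرجع لأقرب سنة متاحة قبلها
--     candidates = [y for y in YEAR_SEQUENCE if y <= target]
--     if candidates:
--         return max(candidates)
--     return None
-- ===== SOURCE B (Python) =====
-- YEAR_SEQUENCE = [38, 39, 40, 41, 42, 44, 45, 46, 47]
--
-- def get_year_n_before(year, n):
--     """Binary search for the rightmost available year <= year - n."""
--     target = year - n
--     lo, hi = 0, len(YEAR_SEQUENCE)
--     while lo < hi:
--         mid = (lo + hi) // 2
--         if YEAR_SEQUENCE[mid] <= target: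
--             lo = mid + 1
--         else:
--             hi = mid
--     return YEAR_SEQUENCE[lo - 1] if lo > 0 else None
-- ===== Notes on version B (the rewrite author's own statement) =====
-- stated objective: alternative
-- what changed: Replaces the membership test plus filter-then-max linear scan with a single binary search (bisect_right by hand) over the sorted YEAR_SEQUENCE, returning the element left of the insertion point.
import Mathlib
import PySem

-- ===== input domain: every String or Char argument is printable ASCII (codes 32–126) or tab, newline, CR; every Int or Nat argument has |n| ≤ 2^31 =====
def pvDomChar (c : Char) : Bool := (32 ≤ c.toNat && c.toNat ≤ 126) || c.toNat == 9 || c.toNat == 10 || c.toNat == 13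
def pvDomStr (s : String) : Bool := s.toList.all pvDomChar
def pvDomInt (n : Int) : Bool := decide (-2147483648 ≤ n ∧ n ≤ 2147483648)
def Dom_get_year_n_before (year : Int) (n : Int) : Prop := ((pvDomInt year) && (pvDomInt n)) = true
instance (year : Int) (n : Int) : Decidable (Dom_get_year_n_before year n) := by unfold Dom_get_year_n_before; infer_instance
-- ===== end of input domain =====

-- B replaces A's membership test + filter-then-max scan by a hand-written binary search
-- (bisect_right) over the sorted table; return value only, no side effects. Objective: alternative.

-- ===== PORT A =====
def YEAR_SEQUENCE : List Int := [38, 39, 40, 41, 42, 44, 45, 46, 47]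

def get_year_n_before (year : Int) (n : Int) : Option Int :=
  let target := year - n
  if target ∈ YEAR_SEQUENCE then some target
  else
    let candidates := YEAR_SEQUENCE.filter (fun y => decide (y ≤ target))
    if candidates ≠ [] then PySem.List.max? candidates (fun y => y)
    else none

-- ===== PORT B =====
-- the while-loop of Source B as structural recursion on hi - lo
def bsLoop (target : Int) (lo hi : Nat) : Nat :=
  if _h : lo < hi then
    let mid := (lo + hi) / 2
    if YEAR_SEQUENCE.getD mid 0 ≤ target then bsLoop target (mid + 1) hi
    else bsLoop target lo mid
  else lo
termination_by hi - lo
decreasing_by all_goals omega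

def get_year_n_before_alt (year : Int) (n : Int) : Option Int :=
  let target := year - n
  let lo := bsLoop target 0 YEAR_SEQUENCE.length
  if 0 < lo then PySem.List.pyGet? YEAR_SEQUENCE ((lo : Int) - 1)
  else none

-- ===== PRECONDITION & SPEC =====
def Spec_get_year_n_before (year : Int) (n : Int) (out : Option Int) : Prop := out = get_year_n_before_alt year n
instance (year : Int) (n : Int) (out : Option Int) : Decidable (Spec_get_year_n_before year n out) := by unfold Spec_get_year_n_before; infer_instance

-- ===== CLAIM (what is proved, stated in full; the proofs are below) =====
def Claim_equal_get_year_n_before : Prop := ∀ (year : Int) (n : Int), Dom_get_year_n_before year n → Spec_get_year_n_before year n (get_year_n_before year n)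

-- ===== LEMMAS AND PROOFS =====

-- both ports depend on (year, n) only through target = year - n
lemma A_shift (year n : Int) : get_year_n_before year n = get_year_n_before (year - n) 0 := by
  simp [get_year_n_before]

lemma B_shift (year n : Int) : get_year_n_before_alt year n = get_year_n_before_alt (year - n) 0 := by
  simp [get_year_n_before_alt]

lemma key (t : Int) : get_year_n_before t 0 = get_year_n_before_alt t 0 := by
  have hlo : t < 38 ∨ (38 ≤ t ∧ t ≤ 47) ∨ 47 < t := by omega
  rcases hlo with h | h | h
  · have h38 : ¬ (38 : Int) ≤ t := by omega
    have h39 : ¬ (39 : Int) ≤ t := by omega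
    have h40 : ¬ (40 : Int) ≤ t := by omega
    have h41 : ¬ (41 : Int) ≤ t := by omega
    have h42 : ¬ (42 : Int) ≤ t := by omega
    have h44 : ¬ (44 : Int) ≤ t := by omega
    have h45 : ¬ (45 : Int) ≤ t := by omega
    have h46 : ¬ (46 : Int) ≤ t := by omega
    have h47 : ¬ (47 : Int) ≤ t := by omega
    simp [get_year_n_before, get_year_n_before_alt, YEAR_SEQUENCE, bsLoop,
      h38, h39, h40, h41, h42, h44, h45, h46, h47]
    omega
  · obtain ⟨h1, h2⟩ := h
    interval_cases t <;>
      simp [get_year_n_before, get_year_n_before_alt, YEAR_SEQUENCE, bsLoop,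
        PySem.List.max?, PySem.List.pyGet?, PySem.List.pyIdx?]
  · have h38 : (38 : Int) ≤ t := by omega
    have h39 : (39 : Int) ≤ t := by omega
    have h40 : (40 : Int) ≤ t := by omega
    have h41 : (41 : Int) ≤ t := by omega
    have h42 : (42 : Int) ≤ t := by omega
    have h44 : (44 : Int) ≤ t := by omega
    have h45 : (45 : Int) ≤ t := by omega
    have h46 : (46 : Int) ≤ t := by omega
    have h47 : (47 : Int) ≤ t := by omega
    have hne : ¬ (t = 38 ∨ t = 39 ∨ t = 40 ∨ t = 41 ∨ t = 42 ∨ t = 44 ∨ t = 45 ∨ t = 46 ∨ t = 47) := by omega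
    simp [get_year_n_before, get_year_n_before_alt, YEAR_SEQUENCE, bsLoop, hne,
      h38, h39, h40, h41, h42, h44, h45, h46, h47,
      PySem.List.max?, PySem.List.pyGet?, PySem.List.pyIdx?]

-- ===== VERDICT (by name: the statement is the Claim_ definition above) =====
theorem get_year_n_before_spec : Claim_equal_get_year_n_before := by
  intro year n _
  unfold Spec_get_year_n_before
  rw [A_shift, B_shift, key]
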